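-- pv_equiv track=rewrite | github.com/Aasthaengg/IBMdataset | Python_codes/p02851/s975247087.py | slv
-- ===== SOURCE A (Python) =====
-- from collections import Counter
--
-- def slv(N, K, A):
--     B = [0]
--     for i, a in enumerate(A, start=0):
--         B.append((B[-1] + a) % K)
--
--     for i in range(len(B)):
--         B[i] = (B[i] - i) % K
--
--     ans = 0
--     C = Counter()
--     n = 0
--     for i, b in enumerate(B):
--         C[b] += 1
--         n += 1
--         if n > K:
--             C[B[i-K]] -= 1
--             n -= 1
--         ans += C[b] - 1
--
--     return ans
-- ===== SOURCE B (Python) =====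
-- def slv(N, K, A):
--     B = [0]
--     for a in A:
--         B.append((B[-1] + a) % K)
--     pos = {}
--     for i, b in enumerate(B):
--         pos.setdefault((b - i) % K, []).append(i)
--     ans = 0
--     for ps in pos.values():
--         l = 0
--         for j in range(len(ps)):
--             while ps[j] - ps[l] >= K:
--                 l += 1
--             ans += j - l
--     return ans
-- ===== Notes on version B (the rewrite author's own statement) =====
-- stated objective: alternative
-- what changed: Replaces A's sliding-window Counter (incrementally adding/evicting prefix values and reading the running multiplicity) by grouping the adjusted prefix values into a dict of ascending index lists and counting, per group, the pairs at distance < K with a two-pointer sweep.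
import Mathlib
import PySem

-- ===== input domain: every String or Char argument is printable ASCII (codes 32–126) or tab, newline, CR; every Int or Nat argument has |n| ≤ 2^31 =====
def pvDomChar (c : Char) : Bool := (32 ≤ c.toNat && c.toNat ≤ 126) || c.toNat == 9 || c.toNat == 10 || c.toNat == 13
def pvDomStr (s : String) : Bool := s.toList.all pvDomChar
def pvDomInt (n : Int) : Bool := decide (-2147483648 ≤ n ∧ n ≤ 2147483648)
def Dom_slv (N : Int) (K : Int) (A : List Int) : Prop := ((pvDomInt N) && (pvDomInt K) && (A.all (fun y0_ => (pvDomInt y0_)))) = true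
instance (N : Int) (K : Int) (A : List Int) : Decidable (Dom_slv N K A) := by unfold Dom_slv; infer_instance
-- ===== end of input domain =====

-- B replaces A's sliding-window Counter by grouping adjusted prefix values into a dict of
-- ascending index lists and counting pairs at distance < K per group with a two-pointer sweep
-- (alternative decomposition, same asymptotic cost).

-- ===== PORT A =====
def slv (N : Int) (K : Int) (A : List Int) : Int :=
  -- B = [0]; for a in A: B.append((B[-1] + a) % K)   (B[-1]: list nonempty, pyGetD exact)
  let B0 : List Int := A.foldl (fun B a => B ++ [PySem.Int.mod (PySem.List.pyGetD B (-1) 0 + a) K]) [0]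
  -- for i in range(len(B)): B[i] = (B[i] - i) % K    (index i always in range)
  let B1 : List Int := (PySem.List.pyRange 0 (B0.length : Int) 1).foldl
      (fun B i => PySem.List.pySetD B i (PySem.Int.mod (PySem.List.pyGetD B i 0 - i) K)) B0
  -- Counter loop; C[b] += 1 / C[x] -= 1 are Counter updates (missing = 0): Dict.modify
  (((PySem.List.enumerate B1 0).foldl
      (fun (s : Int × PySem.Dict Int Int × Int) p =>
        let C1 := s.2.1.modify p.2 0 (· + 1)
        let n1 := s.2.2 + 1
        let Cn : PySem.Dict Int Int × Int :=
          if K < n1 then (C1.modify (PySem.List.pyGetD B1 (p.1 - K) 0) 0 (· - 1), n1 - 1)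
          else (C1, n1)
        (s.1 + (Cn.1.getD p.2 0 - 1), Cn.1, Cn.2))
      (0, PySem.Dict.empty, 0)).1)

-- ===== PORT B =====
-- while ps[j] - ps[l] >= K: l += 1   (the 'l < ps.length' guard only makes the recursion
-- total; under Pre_ (1 ≤ K) the while stops at l = j < ps.length at the latest)
def advance (ps : List Int) (K : Int) (j : Nat) (l : Nat) : Nat :=
  if h : l < ps.length ∧ K ≤ ps.getD j 0 - ps.getD l 0 then advance ps K j (l + 1) else l
termination_by ps.length - l
decreasing_by omega

def slv_alt (N : Int) (K : Int) (A : List Int) : Int :=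
  -- B = [0]; for a in A: B.append((B[-1] + a) % K)
  let B0 : List Int := A.foldl (fun B a => B ++ [PySem.Int.mod (PySem.List.pyGetD B (-1) 0 + a) K]) [0]
  -- for i, b in enumerate(B): pos.setdefault((b - i) % K, []).append(i)
  let pos : PySem.Dict Int (List Int) := (PySem.List.enumerate B0 0).foldl
      (fun d p => d.modify (PySem.Int.mod (p.2 - p.1) K) [] (· ++ [p.1])) PySem.Dict.empty
  -- for ps in pos.values(): two-pointer over the ascending position list
  pos.values.foldl (fun ans ps =>
    ((List.range ps.length).foldl
        (fun (s : Int × Nat) j =>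
          let l := advance ps K j s.2
          (s.1 + ((j : Int) - (l : Int)), l))
        (ans, 0)).1) 0

-- ===== PRECONDITION & SPEC =====
-- Pre_ excludes exactly the inputs where A raises: K = 0 (ZeroDivisionError on %) and
-- K < 0 (B[i-K] with i-K ≥ len(B) raises IndexError at the last iteration).
def Pre_slv (N : Int) (K : Int) (A : List Int) : Prop := 1 ≤ K
instance (N : Int) (K : Int) (A : List Int) : Decidable (Pre_slv N K A) := by unfold Pre_slv; infer_instance
def pvWitness_slv : Int × Int × List Int := (4, 4, [1, 4, 2, 3])

def Spec_slv (N : Int) (K : Int) (A : List Int) (out : Int) : Prop := out = slv_alt N K A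
instance (N : Int) (K : Int) (A : List Int) (out : Int) : Decidable (Spec_slv N K A out) := by unfold Spec_slv; infer_instance

-- ===== CLAIM (what is proved, stated in full; the proofs are below) =====
def Claim_equal_slv : Prop := ∀ (N : Int) (K : Int) (A : List Int), Dom_slv N K A → Pre_slv N K A → Spec_slv N K A (slv N K A)

-- ===== LEMMAS AND PROOFS =====

-- the prefix list B after the first loop (identical in both ports)
def bList (K : Int) (A : List Int) : List Int :=
  A.foldl (fun B a => B ++ [PySem.Int.mod (PySem.List.pyGetD B (-1) 0 + a) K]) [0]

-- the adjusted value (B[t] - t) % K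
def aL (K : Int) (A : List Int) (t : Nat) : Int :=
  PySem.Int.mod ((bList K A).getD t 0 - (t : Int)) K

-- number of positions t < k with adjusted value v
def Pc (K : Int) (A : List Int) (k : Nat) (v : Int) : Int :=
  (((List.range k).filter (fun t => decide (aL K A t = v))).length : Int)

-- contribution of position j: matches in the window [j+1-K, j)
def cnt (K : Int) (A : List Int) (j : Nat) : Int :=
  Pc K A j (aL K A j) - Pc K A (j + 1 - K.toNat) (aL K A j)


-- ---------- generic list lemmas ----------

theorem L_filter_lt_range (k m : Nat) (h : k ≤ m) :
    (List.range m).filter (fun t => decide (t < k)) = List.range k := by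
  have : m = k + (m - k) := by omega
  rw [this, List.range_add, List.filter_append]
  have h1 : (List.range k).filter (fun t => decide (t < k)) = List.range k := by
    rw [List.filter_eq_self]
    intro a ha; simp [List.mem_range] at ha ⊢; omega
  have h2 : ((List.range (m - k)).map (fun x => k + x)).filter (fun t => decide (t < k)) = [] := by
    rw [List.filter_eq_nil_iff]
    intro a ha; simp [List.mem_map] at ha ⊢; omega
  rw [h1, h2, List.append_nil]

theorem L_filter_not_length {α : Type} (l : List α) (p : α → Bool) :
    (l.filter (fun x => !p x)).length = l.length - (l.filter p).length := by
  induction l with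
  | nil => simp
  | cons a l ih =>
    have hle : (l.filter p).length ≤ l.length := List.length_filter_le _ _
    by_cases h : p a <;> simp [List.filter_cons, h, ih] <;> omega

theorem L_idx {α : Type} (l : List α) (p : α → Bool) (d : α) :
    (l.filter p).length = ((List.range l.length).filter (fun i => p (l.getD i d))).length := by
  induction l with
  | nil => simp
  | cons a l ih =>
    rw [List.length_cons, List.range_succ_eq_map, List.filter_cons, List.filter_cons]
    by_cases h : p a <;>
      simp [h, List.filter_map, Function.comp_def, List.getD_cons_succ, ih]

theorem L_mapidx {α : Type} (l : List α) (f : α → Int) (d : α) :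
    (List.range l.length).map (fun i => f (l.getD i d)) = l.map f := by
  induction l with
  | nil => simp
  | cons a l ih =>
    rw [List.length_cons, List.range_succ_eq_map]
    simp only [List.map_cons, List.getD_cons_zero, List.map_map]
    rw [← ih]; rfl

theorem L_foldl_add_mem {α : Type} (l : List α) (f : Int → α → Int) (g : α → Int)
    (h : ∀ x ∈ l, ∀ a, f a x = a + g x) : ∀ i, l.foldl f i = i + (l.map g).sum := by
  induction l with
  | nil => simp
  | cons a l ih =>
    intro i
    rw [List.foldl_cons, h a (by simp), ih (fun x hx => h x (by simp [hx]))]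
    simp [add_assoc]

theorem L_split {α : Type} (l : List α) (p : α → Bool) (f : α → Int) :
    ((l.filter p).map f).sum + ((l.filter (fun x => !p x)).map f).sum = (l.map f).sum := by
  induction l with
  | nil => simp
  | cons a l ih =>
    by_cases h : p a <;> simp [List.filter_cons, h] <;> omega

theorem L_part (V : List Int) (key : Nat → Int) (f : Nat → Int) :
    ∀ (xs : List Nat), (∀ x ∈ xs, key x ∈ V) → V.Nodup →
    (V.map (fun c => ((xs.filter (fun t => decide (key t = c))).map f).sum)).sum
      = (xs.map f).sum := by
  induction V with
  | nil => intro xs hcov _; cases xs with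
    | nil => simp
    | cons a l => exact absurd (hcov a (by simp)) (by simp)
  | cons c V ih =>
    intro xs hcov hnd
    rw [List.map_cons, List.sum_cons]
    have hnd' := hnd
    rw [List.nodup_cons] at hnd'
    have hrest : ∀ c' ∈ V, xs.filter (fun t => decide (key t = c'))
        = (xs.filter (fun t => !decide (key t = c))).filter (fun t => decide (key t = c')) := by
      intro c' hc'
      rw [List.filter_filter]
      apply List.filter_congr
      intro t _
      by_cases h : key t = c'
      · have hcc : ¬ c' = c := fun e => hnd'.1 (e ▸ hc')
        have hne : ¬ key t = c := fun hh => hcc (h ▸ hh ▸ rfl)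
        simp [h, hne, hcc]
      · simp [h]
    have hmapc : (V.map (fun c' => ((xs.filter (fun t => decide (key t = c'))).map f).sum))
        = (V.map (fun c' => (((xs.filter (fun t => !decide (key t = c))).filter
            (fun t => decide (key t = c'))).map f).sum)) := by
      apply List.map_congr_left
      intro c' hc'; rw [hrest c' hc']
    rw [hmapc, ih _ (by
      intro x hx
      rw [List.mem_filter] at hx
      have := hcov x hx.1
      simp at hx
      rcases List.mem_cons.1 this with h | h
      · exact absurd h hx.2
      · exact h) hnd'.2]
    exact L_split xs (fun t => decide (key t = c)) f

-- ---------- the shared first loop and the A-side ----------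

-- step function of A's Counter loop (definitionally the lambda in the port)
def stepA (K : Int) (B1 : List Int) (s : Int × PySem.Dict Int Int × Int) (p : Int × Int) :
    Int × PySem.Dict Int Int × Int :=
  let C1 := s.2.1.modify p.2 0 (· + 1)
  let n1 := s.2.2 + 1
  let Cn : PySem.Dict Int Int × Int :=
    if K < n1 then (C1.modify (PySem.List.pyGetD B1 (p.1 - K) 0) 0 (· - 1), n1 - 1)
    else (C1, n1)
  (s.1 + (Cn.1.getD p.2 0 - 1), Cn.1, Cn.2)

-- A's second loop (in-place adjust)
def B1raw (K : Int) (A : List Int) : List Int :=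
  (PySem.List.pyRange 0 ((bList K A).length : Int) 1).foldl
      (fun B i => PySem.List.pySetD B i (PySem.Int.mod (PySem.List.pyGetD B i 0 - i) K)) (bList K A)

theorem slv_unfold (N K : Int) (A : List Int) :
    slv N K A = ((PySem.List.enumerate (B1raw K A) 0).foldl (stepA K (B1raw K A))
      (0, PySem.Dict.empty, 0)).1 := rfl

theorem setfold_pref (B : List Int) (K : Int) :
    ∀ k, k ≤ B.length →
    (PySem.List.pyRange 0 (k : Int) 1).foldl
        (fun B' i => PySem.List.pySetD B' i (PySem.Int.mod (PySem.List.pyGetD B' i 0 - i) K)) B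
      = (List.range k).map (fun t => PySem.Int.mod (B.getD t 0 - (t : Int)) K) ++ B.drop k := by
  intro k hk
  induction k with
  | zero => simp [PySem.List.pyRange_one_eq_nil]
  | succ k ih =>
    have hk' : k ≤ B.length := by omega
    have hlt : k < B.length := by omega
    rw [show ((k + 1 : Nat) : Int) = (k : Int) + 1 by push_cast; ring,
      PySem.List.pyRange_one_succ_right (by positivity),
      List.foldl_append, ih hk']
    have hgd : PySem.List.pyGetD
        ((List.range k).map (fun t => PySem.Int.mod (B.getD t 0 - (t : Int)) K) ++ B.drop k)
        (k : Int) 0 = B.getD k 0 := by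
      rw [PySem.List.pyGetD_natCast]
      rw [List.getD_eq_getElem?_getD, List.getElem?_append_right (by simp)]
      simp [List.getElem?_drop, List.getD_eq_getElem?_getD]
    simp only [List.foldl_cons, List.foldl_nil, PySem.List.pySetD_natCast, hgd]
    rw [List.drop_eq_getElem_cons hlt, List.range_succ, List.map_append]
    rw [List.set_append_right _ _ (by simp)]
    simp only [List.length_map, List.length_range, Nat.sub_self, List.append_assoc,
      List.singleton_append, List.append_cancel_left_eq]
    simp [List.getD_eq_getElem?_getD]
    rw [List.drop_eq_getElem_cons hlt, List.set_cons_zero]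

theorem B1raw_eq (K : Int) (A : List Int) :
    B1raw K A = (List.range (bList K A).length).map (aL K A) := by
  unfold B1raw
  rw [setfold_pref (bList K A) K (bList K A).length le_rfl]
  simp [aL]

theorem Pc_zero (K : Int) (A : List Int) (v : Int) : Pc K A 0 v = 0 := by simp [Pc]

theorem Pc_succ (K : Int) (A : List Int) (k : Nat) (v : Int) :
    Pc K A (k + 1) v = Pc K A k v + (if v = aL K A k then 1 else 0) := by
  unfold Pc
  rw [List.range_succ, List.filter_append]
  by_cases h : v = aL K A k <;> simp [h, eq_comm]

theorem enum_map_range (L : List Int) (m : Nat) (f : Nat → Int) (hL : L = (List.range m).map f) :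
    PySem.List.enumerate L 0 = (List.range m).map (fun (t : Nat) => ((t : Int), f t)) := by
  rw [PySem.List.enumerate_eq_map_pyRange L 0]
  have hlen : PySem.List.len L = (m : Int) := by simp [PySem.List.len_eq, hL]
  rw [hlen, PySem.List.pyRange_one, List.map_map]
  simp only [Int.sub_zero, Int.toNat_natCast]
  apply List.map_congr_left
  intro t ht
  rw [List.mem_range] at ht
  simp only [Function.comp, zero_add, PySem.List.pyGetD_natCast, hL,
    PySem.List.getD_map_range f m t 0 ht]

-- A's Counter-loop invariant: after k steps the accumulator is Σ_{j<k} cnt j, the dict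
-- holds the window counts Pc k v - Pc (k - K) v, and n = min k K.
theorem lemInvA (K : Int) (A : List Int) (hK : 1 ≤ K) :
    ∀ k, k ≤ (bList K A).length →
    ∃ C : PySem.Dict Int Int,
      (List.range k).foldl
          (fun (s : Int × PySem.Dict Int Int × Int) (t : Nat) => stepA K ((List.range (bList K A).length).map (aL K A)) s ((t : Int), aL K A t))
          (0, PySem.Dict.empty, 0)
        = (((List.range k).map (cnt K A)).sum, C, min (k : Int) K)
      ∧ ∀ v, C.getD v 0 = Pc K A k v - Pc K A (k - K.toNat) v := by
  intro k
  induction k with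
  | zero =>
    intro _
    refine ⟨PySem.Dict.empty, ?_, ?_⟩
    · simp; omega
    · intro v; simp [Pc_zero, PySem.Dict.getD_empty]
  | succ k ih =>
    intro hk1
    have hkm : k < (bList K A).length := by omega
    obtain ⟨C, hfold, hC⟩ := ih (by omega)
    rw [List.range_succ, List.foldl_append, hfold, List.foldl_cons, List.foldl_nil,
      List.map_append, List.sum_append]
    simp only [List.map_cons, List.map_nil, List.sum_cons, List.sum_nil, add_zero]
    by_cases hbr : (K : Int) ≤ (k : Int)
    · -- window full: increment aL k, evict aL (k - K)
      have hcond : K < min (k : Int) K + 1 := by omega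
      have htn : (k : Int) - K = ((k - K.toNat : Nat) : Int) := by omega
      have hlt2 : k - K.toNat < (bList K A).length := by omega
      have ha0 : PySem.List.pyGetD ((List.range (bList K A).length).map (aL K A)) ((k : Int) - K) 0
          = aL K A (k - K.toNat) := by
        rw [htn, PySem.List.pyGetD_natCast,
          PySem.List.getD_map_range _ _ _ _ hlt2]
      have hsub : k + 1 - K.toNat = (k - K.toNat) + 1 := by omega
      refine ⟨(C.modify (aL K A k) 0 (· + 1)).modify (aL K A (k - K.toNat)) 0 (· - 1), ?_, ?_⟩
      · simp only [stepA, ha0, if_pos hcond]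
        refine Prod.ext ?_ (Prod.ext rfl ?_)
        swap
        · simp only; push_cast; omega
        simp only
        have hcnt : cnt K A k = Pc K A k (aL K A k) - Pc K A (k + 1 - K.toNat) (aL K A k) := rfl
        have hCb := hC (aL K A k)
        rw [hcnt, hsub, Pc_succ, PySem.Dict.getD_modify]
        by_cases h1 : aL K A k = aL K A (k - K.toNat)
        · rw [if_pos h1, ← h1, PySem.Dict.getD_modify_self, if_pos rfl]
          omega
        · rw [if_neg h1, PySem.Dict.getD_modify_self, if_neg (fun h => h1 h)]
          omega
      · intro v
        have hCv := hC v
        rw [hsub, Pc_succ, Pc_succ]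
        simp only [PySem.Dict.getD_modify]
        by_cases h2 : v = aL K A k <;> by_cases h1 : v = aL K A (k - K.toNat)
        · rw [← h2, ← h1]; simp; omega
        · rw [← h2]
          have h1' : ¬ (aL K A (k - K.toNat) = v) := fun h => h1 h.symm
          simp [h1, h1']
          omega
        · rw [← h1]
          have h2' : ¬ (aL K A k = v) := fun h => h2 h.symm
          simp [h2, h2']
          omega
        · simp [h1, h2]
          omega
    · -- window not yet full
      have hcond : ¬ (K < min (k : Int) K + 1) := by omega
      have h0 : k - K.toNat = 0 := by omega
      have h0' : k + 1 - K.toNat = 0 := by omega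
      refine ⟨C.modify (aL K A k) 0 (· + 1), ?_, ?_⟩
      · simp only [stepA, if_neg hcond]
        refine Prod.ext ?_ (Prod.ext rfl ?_)
        swap
        · simp only; push_cast; omega
        simp only [PySem.Dict.getD_modify_self]
        have hcnt : cnt K A k = Pc K A k (aL K A k) - Pc K A (k + 1 - K.toNat) (aL K A k) := rfl
        have hCb := hC (aL K A k)
        rw [hcnt, h0'] at *
        rw [h0] at hCb
        rw [Pc_zero] at *
        omega
      · intro v
        have hCv := hC v
        rw [h0] at hCv
        rw [h0', Pc_succ, Pc_zero]
        simp only [PySem.Dict.getD_modify]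
        by_cases h2 : v = aL K A k
        · rw [← h2]; simp; rw [Pc_zero] at hCv; omega
        · simp [h2]; rw [Pc_zero] at hCv; omega

theorem lemA (N K : Int) (A : List Int) (hK : 1 ≤ K) :
    slv N K A = ((List.range (bList K A).length).map (cnt K A)).sum := by
  rw [slv_unfold, B1raw_eq,
    enum_map_range _ (bList K A).length (aL K A) rfl, List.foldl_map]
  obtain ⟨C, hfold, -⟩ := lemInvA K A hK (bList K A).length le_rfl
  rw [hfold]

-- ---------- the B-side ----------

-- positions (as Nat) whose adjusted value is c
def pN (K : Int) (A : List Int) (c : Int) : List Nat :=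
  (List.range (bList K A).length).filter (fun t => decide (aL K A t = c))

-- per-index contribution of the two-pointer loop
def gq (q : List Int) (K : Int) (j : Nat) : Int :=
  (((List.range j).filter (fun i => decide (q.getD j 0 - q.getD i 0 < K))).length : Int)

theorem enum_idx (L : List Int) :
    PySem.List.enumerate L 0 = (List.range L.length).map (fun (t : Nat) => ((t : Int), L.getD t 0)) := by
  rw [PySem.List.enumerate_eq_map_pyRange L 0, PySem.List.pyRange_one, List.map_map]
  simp only [PySem.List.len_eq, Int.sub_zero, Int.toNat_natCast]
  apply List.map_congr_left
  intro t _
  simp [Function.comp, PySem.List.pyGetD_natCast]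

def posFold (K : Int) (A : List Int) : PySem.Dict Int (List Int) :=
  ((List.range (bList K A).length).map (fun (t : Nat) => (aL K A t, (t : Int)))).foldl
    (fun d p => d.modify p.1 [] (· ++ [p.2])) PySem.Dict.empty

theorem posDict_eq (K : Int) (A : List Int) :
    (PySem.List.enumerate (bList K A) 0).foldl
        (fun (d : PySem.Dict Int (List Int)) p =>
          d.modify (PySem.Int.mod (p.2 - p.1) K) [] (· ++ [p.1]))
        PySem.Dict.empty
      = posFold K A := by
  unfold posFold
  rw [enum_idx (bList K A), List.foldl_map, List.foldl_map]
  rfl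

theorem slv_alt_unfold (N K : Int) (A : List Int) :
    slv_alt N K A = (posFold K A).values.foldl (fun ans ps =>
      ((List.range ps.length).foldl
          (fun (s : Int × Nat) j =>
            let l := advance ps K j s.2
            (s.1 + ((j : Int) - (l : Int)), l))
          (ans, 0)).1) 0 := by
  rw [← posDict_eq]
  rfl

theorem posFold_getD (K : Int) (A : List Int) (c : Int) :
    (posFold K A).getD c [] = (pN K A c).map (fun (t : Nat) => (t : Int)) := by
  unfold posFold pN
  rw [PySem.Dict.getD_foldl_modify_append]
  rw [List.filter_map, List.map_map]
  have hp : ((fun (p : Int × Int) => p.1 == c) ∘ (fun (t : Nat) => (aL K A t, (t : Int))))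
      = fun t => decide (aL K A t = c) := by
    funext t
    by_cases h : aL K A t = c <;> simp [h]
  rw [hp]
  simp [PySem.Dict.getD_empty]

theorem posFold_keys_nodup (K : Int) (A : List Int) : (posFold K A).keys.Nodup := by
  unfold posFold
  exact PySem.Dict.nodup_keys_foldl_modify_key
    ((List.range (bList K A).length).map (fun (t : Nat) => (aL K A t, (t : Int))))
    (fun (p : Int × Int) => p.1) []
    (fun (d : PySem.Dict Int (List Int)) (p : Int × Int) => (· ++ [p.2]))
    PySem.Dict.empty PySem.Dict.nodup_keys_empty

theorem posFold_keys_mem (K : Int) (A : List Int) (t : Nat) (ht : t < (bList K A).length) :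
    aL K A t ∈ (posFold K A).keys := by
  unfold posFold
  rw [PySem.Dict.keys_foldl_modify_key
    ((List.range (bList K A).length).map (fun (t : Nat) => (aL K A t, (t : Int))))
    (fun (p : Int × Int) => p.1) []
    (fun (d : PySem.Dict Int (List Int)) (p : Int × Int) => (· ++ [p.2]))]
  rw [PySem.Dict.keys_empty, PySem.Set.update_nil_left, PySem.Set.mem_ofList, List.map_map]
  exact List.mem_map.2 ⟨t, List.mem_range.2 ht, rfl⟩

-- the while loop: advance stops at the least l with q[j] - q[l] < K
theorem advance_spec (q : List Int) (K : Int) (hK : 1 ≤ K) (j : Nat) (hj : j < q.length) :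
    ∀ n l, j - l ≤ n → l ≤ j → (∀ i < l, K ≤ q.getD j 0 - q.getD i 0) →
      advance q K j l ≤ j ∧ (∀ i < advance q K j l, K ≤ q.getD j 0 - q.getD i 0) ∧
        q.getD j 0 - q.getD (advance q K j l) 0 < K := by
  intro n
  induction n with
  | zero =>
    intro l hfu hlj hwin
    have hlj' : l = j := by omega
    subst hlj'
    rw [advance, dif_neg (by intro h; omega)]
    exact ⟨le_rfl, hwin, by omega⟩
  | succ n ih =>
    intro l hfu hlj hwin
    rw [advance]
    by_cases hc : l < q.length ∧ K ≤ q.getD j 0 - q.getD l 0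
    · rw [dif_pos hc]
      have hlj' : l < j := by
        rcases Nat.lt_or_ge l j with h | h
        · exact h
        · exfalso; have : l = j := by omega
          subst this; omega
      exact ih (l + 1) (by omega) (by omega)
        (fun i hi => by rcases Nat.lt_or_ge i l with h | h
                        · exact hwin i h
                        · have : i = l := by omega
                          subst this; exact hc.2)
    · rw [dif_neg hc]
      have hstop : ¬ K ≤ q.getD j 0 - q.getD l 0 := fun h => hc ⟨by omega, h⟩
      exact ⟨hlj, hwin, by omega⟩

theorem L_count_win (j r : Nat) (hrj : r ≤ j) (p : Nat → Bool)
    (hlow : ∀ i, i < r → p i = false) (hhigh : ∀ i, r ≤ i → i < j → p i = true) :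
    ((List.range j).filter p).length = j - r := by
  have hsplit : j = r + (j - r) := by omega
  rw [hsplit, List.range_add, List.filter_append]
  have h1 : (List.range r).filter p = [] := by
    rw [List.filter_eq_nil_iff]; intro a ha
    simp [hlow a (List.mem_range.1 ha)]
  have h2 : ((List.range (j - r)).map (fun x => r + x)).filter p
      = (List.range (j - r)).map (fun x => r + x) := by
    rw [List.filter_eq_self]
    intro a ha
    obtain ⟨x, hx, rfl⟩ := List.mem_map.1 ha
    exact hhigh (r + x) (by omega) (by have := List.mem_range.1 hx; omega)
  rw [h1, h2]
  simp

theorem L_filter_range_restrict (n j : Nat) (hj : j ≤ n) (p : Nat → Bool)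
    (h : ∀ i, i < n → p i = true → i < j) :
    (List.range n).filter p = (List.range j).filter p := by
  have hsplit : n = j + (n - j) := by omega
  rw [hsplit, List.range_add, List.filter_append]
  have h2 : ((List.range (n - j)).map (fun x => j + x)).filter p = [] := by
    rw [List.filter_eq_nil_iff]
    intro a ha
    obtain ⟨x, hx, rfl⟩ := List.mem_map.1 ha
    intro hpa
    have := h _ (by have := List.mem_range.1 hx; omega) hpa
    omega
  rw [h2, List.append_nil]

-- the inner two-pointer loop computes Σ_j gq
theorem lemInner (q : List Int) (K : Int) (hK : 1 ≤ K)
    (hmono : ∀ i j, i ≤ j → j < q.length → q.getD i 0 ≤ q.getD j 0) (ans : Int) :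
    ((List.range q.length).foldl
        (fun (s : Int × Nat) (j : Nat) =>
          let l := advance q K j s.2
          (s.1 + ((j : Int) - (l : Int)), l))
        (ans, 0)).1
      = ans + ((List.range q.length).map (gq q K)).sum := by
  suffices h : ∀ k, k ≤ q.length →
      ∃ l : Nat,
        (List.range k).foldl
            (fun (s : Int × Nat) (j : Nat) =>
              (s.1 + ((j : Int) - ((advance q K j s.2 : Nat) : Int)), advance q K j s.2))
            (ans, 0)
          = (ans + ((List.range k).map (gq q K)).sum, l)
        ∧ l ≤ k ∧ ∀ i < l, ∀ j', k ≤ j' → j' < q.length → K ≤ q.getD j' 0 - q.getD i 0 by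
    obtain ⟨l, hf, -, -⟩ := h q.length le_rfl
    exact congrArg Prod.fst hf
  intro k
  induction k with
  | zero => exact fun _ => ⟨0, by simp, by omega, by omega⟩
  | succ k ih =>
    intro hk1
    obtain ⟨l, hf, hlk, hwin⟩ := ih (by omega)
    have hkq : k < q.length := by omega
    have hpre : ∀ i < l, K ≤ q.getD k 0 - q.getD i 0 :=
      fun i hi => hwin i hi k le_rfl hkq
    obtain ⟨hrle, hrwin, hrstop⟩ :=
      advance_spec q K hK k hkq (k - l) l le_rfl hlk hpre
    set r := advance q K k l with hr
    refine ⟨r, ?_, by omega, ?_⟩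
    · rw [List.range_succ, List.foldl_append, hf, List.foldl_cons, List.foldl_nil]
      simp only
      rw [List.map_append, List.sum_append]
      simp only [List.map_cons, List.map_nil, List.sum_cons, List.sum_nil, add_zero]
      have hgq : gq q K k = (k : Int) - (r : Int) := by
        unfold gq
        rw [L_count_win k r hrle _
          (fun i hi => by
            simp only [decide_eq_false_iff_not]
            have := hrwin i hi
            omega)
          (fun i hri hik => by
            simp only [decide_eq_true_eq]
            have h1 : q.getD i 0 ≥ q.getD r 0 := hmono r i hri (by omega)
            omega)]
        omega
      rw [hgq, ← hr]
      ring_nf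
    · intro i hi j' hj' hj'q
      have h1 : K ≤ q.getD k 0 - q.getD i 0 := hrwin i hi
      have h2 : q.getD k 0 ≤ q.getD j' 0 := hmono k j' (by omega) hj'q
      omega

-- ---------- per-group counting ----------

theorem pN_sorted (K : Int) (A : List Int) (c : Int) : (pN K A c).Pairwise (· < ·) :=
  (List.pairwise_lt_range).filter _

theorem sorted_getD_lt (L : List Nat) (h : L.Pairwise (· < ·)) (i j : Nat) (hij : i < j)
    (hj : j < L.length) : L.getD i 0 < L.getD j 0 := by
  rw [List.getD_eq_getElem L 0 (by omega), List.getD_eq_getElem L 0 hj]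
  exact List.pairwise_iff_getElem.1 h i j (by omega) hj hij

theorem q_getD (L : List Nat) (i : Nat) (h : i < L.length) :
    (L.map (fun (t : Nat) => (t : Int))).getD i 0 = ((L.getD i 0 : Nat) : Int) := by
  rw [List.getD_eq_getElem _ 0 (by simpa using h), List.getD_eq_getElem L 0 h, List.getElem_map]

theorem pN_mem_facts (K : Int) (A : List Int) (c : Int) (t : Nat) (ht : t ∈ pN K A c) :
    t < (bList K A).length ∧ aL K A t = c := by
  unfold pN at ht
  rw [List.mem_filter, List.mem_range] at ht
  exact ⟨ht.1, by simpa using ht.2⟩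

theorem Pc_pN (K : Int) (A : List Int) (c : Int) (k : Nat) (hk : k ≤ (bList K A).length) :
    Pc K A k c = (((pN K A c).filter (fun t => decide (t < k))).length : Int) := by
  unfold Pc pN
  rw [List.filter_filter, ← L_filter_lt_range k (bList K A).length hk, List.filter_filter]
  congr 2
  apply List.filter_congr
  intro t _
  rw [Bool.and_comm]

theorem lemGroup (K : Int) (A : List Int) (hK : 1 ≤ K) (c : Int) :
    ((List.range ((pN K A c).map (fun (t : Nat) => (t : Int))).length).map
        (gq ((pN K A c).map (fun (t : Nat) => (t : Int))) K)).sum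
      = ((pN K A c).map (cnt K A)).sum := by
  set L := pN K A c with hL
  set q := L.map (fun (t : Nat) => (t : Int)) with hq
  have hlen : q.length = L.length := by simp [hq]
  have hsort := pN_sorted K A c
  rw [hlen]
  rw [← L_mapidx L (cnt K A) 0]
  apply congrArg
  apply List.map_congr_left
  intro j hj
  rw [List.mem_range] at hj
  set tj := L.getD j 0 with htj
  have htjm : tj ∈ L := by
    rw [htj, List.getD_eq_getElem L 0 hj]; exact List.getElem_mem hj
  obtain ⟨htm, hta⟩ := pN_mem_facts K A c tj htjm
  set sN := tj + 1 - K.toNat with hsN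
  -- cnt at tj, via the position list
  have hcnt : cnt K A tj = Pc K A tj c - Pc K A sN c := by
    unfold cnt; rw [hta, hsN]
  have hstj : sN ≤ tj := by omega
  -- Pc tj c = j
  have h1 : Pc K A tj c = (j : Int) := by
    rw [Pc_pN K A c tj (by omega), L_idx L _ 0]
    have : (List.range L.length).filter (fun i => decide (L.getD i 0 < tj))
        = (List.range L.length).filter (fun i => decide (i < j)) := by
      apply List.filter_congr
      intro i hi
      rw [List.mem_range] at hi
      by_cases h : i < j
      · have hlt := sorted_getD_lt L hsort i j h hj
        rw [← htj] at hlt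
        simp only [decide_eq_decide]
        exact iff_of_true hlt h
      · have hge : ¬ L.getD i 0 < tj := by
          rcases Nat.eq_or_lt_of_le (Nat.le_of_not_lt h) with he | hlt2
          · subst he; omega
          · have := sorted_getD_lt L hsort j i hlt2 hi
            omega
        simp only [decide_eq_decide]
        exact iff_of_false hge h
    rw [this, L_filter_lt_range j L.length (by omega)]
    simp
  -- Pc sN c = count below sN among the first j positions
  have h2 : Pc K A sN c
      = (((List.range j).filter (fun i => decide (L.getD i 0 < sN))).length : Int) := by
    have hres : ∀ i, i < L.length → (decide (L.getD i 0 < sN)) = true → i < j := by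
      intro i hi hp
      rw [decide_eq_true_eq] at hp
      by_contra hij
      have hji : j ≤ i := by omega
      rcases Nat.eq_or_lt_of_le hji with he | hlt
      · subst he; omega
      · have := sorted_getD_lt L hsort j i hlt hi; omega
    rw [Pc_pN K A c sN (by omega), L_idx L _ 0,
      L_filter_range_restrict L.length j hj.le _ hres]
  -- gq = j - (count below sN)
  have h3 : gq q K j = ((j - ((List.range j).filter (fun i => decide (L.getD i 0 < sN))).length : Nat) : Int) := by
    unfold gq
    have hqj : q.getD j 0 = ((tj : Nat) : Int) := by rw [hq, q_getD L j hj, htj]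
    have hset : (List.range j).filter (fun i => decide (q.getD j 0 - q.getD i 0 < K))
        = (List.range j).filter (fun i => !decide (L.getD i 0 < sN)) := by
      apply List.filter_congr
      intro i hi
      rw [List.mem_range] at hi
      have hqi : q.getD i 0 = ((L.getD i 0 : Nat) : Int) := q_getD L i (by omega)
      rw [hqj, hqi]
      by_cases h : L.getD i 0 < sN
      · simp only [h, decide_true, Bool.not_true, decide_eq_false_iff_not]
        omega
      · simp only [h, decide_false, Bool.not_false, decide_eq_true_eq]
        omega
    rw [hset, L_filter_not_length]
    simp
  have hle : ((List.range j).filter (fun i => decide (L.getD i 0 < sN))).length ≤ j := by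
    have := List.length_filter_le (fun i => decide (L.getD i 0 < sN)) (List.range j)
    simpa using this
  rw [h3, hcnt, h1, h2]
  push_cast [hle]
  omega

-- ---------- assembling B ----------

theorem lemB (N K : Int) (A : List Int) (hK : 1 ≤ K) :
    slv_alt N K A = ((List.range (bList K A).length).map (cnt K A)).sum := by
  rw [slv_alt_unfold]
  rw [PySem.Dict.values_eq_map_keys _ (posFold_keys_nodup K A) []]
  have hstep : ∀ ps ∈ (posFold K A).keys.map (fun c => (posFold K A).getD c []), ∀ ans : Int,
      ((List.range ps.length).foldl
          (fun (s : Int × Nat) (j : Nat) =>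
            let l := advance ps K j s.2
            (s.1 + ((j : Int) - (l : Int)), l))
          (ans, 0)).1
        = ans + ((List.range ps.length).map (gq ps K)).sum := by
    intro ps hps ans
    obtain ⟨c, hc, rfl⟩ := List.mem_map.1 hps
    rw [posFold_getD]
    apply lemInner _ K hK
    intro i j hij hj
    rcases Nat.eq_or_lt_of_le hij with he | hlt
    · subst he; omega
    · have hjl : j < (pN K A c).length := by simpa using hj
      rw [q_getD _ i (by omega), q_getD _ j hjl]
      have := sorted_getD_lt (pN K A c) (pN_sorted K A c) i j hlt hjl
      omega
  rw [L_foldl_add_mem _ _ (fun ps => ((List.range ps.length).map (gq ps K)).sum) hstep 0]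
  rw [zero_add, List.map_map]
  have hmap : ((posFold K A).keys.map
      ((fun ps => ((List.range ps.length).map (gq ps K)).sum) ∘ fun c => (posFold K A).getD c []))
      = (posFold K A).keys.map (fun c => ((pN K A c).map (cnt K A)).sum) := by
    apply List.map_congr_left
    intro c hc
    simp only [Function.comp]
    rw [posFold_getD]
    exact lemGroup K A hK c
  rw [hmap]
  have := L_part (posFold K A).keys (aL K A) (cnt K A) (List.range (bList K A).length)
    (fun t ht => posFold_keys_mem K A t (List.mem_range.1 ht)) (posFold_keys_nodup K A)
  exact this

theorem slv_spec : Claim_equal_slv := by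
  intro N K A _ hpre
  unfold Spec_slv
  rw [lemA N K A hpre, lemB N K A hpre]
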